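-- pv_equiv track=rewrite | github.com/UndiFineD/PyAgent | tools/fix_common_parse_errors.py | fix_double_quote_docstring_pairs
-- ===== SOURCE A (Python) =====
-- from typing import Tuple
--
-- def fix_double_quote_docstring_pairs(text: str) -> Tuple[str, bool]:
--     """Convert pairs of lines that contain only two double quotes into triple-quoted blocks.
--
--     Detect a pattern where a line contains exactly two double-quote characters
--     on its own, followed later by another such line. The region between them is
--     treated as a docstring paragraph and the pair is replaced with proper
--     triple-quote delimiters (three double-quote characters) surrounding that
--     paragraph. The docstring here avoids embedding literal triple-quote
--     examples to remain parser-safe.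
--     """
--     lines = text.splitlines(True)
--     changed = False
--     i = 0
--     out = []
--     n = len(lines)
--     while i < n:
--         ln = lines[i]
--         if ln.strip() == '""':
--             # look ahead for a closing pair within a reasonable window
--             j = i + 1
--             while j < n and j <= i + 300:
--                 if lines[j].strip() == '""':
--                     # replace opening and closing with triple quotes
--                     out.append('"""' + ("\n" if not ln.endswith('\n') else "\n"))
--                     # copy middle lines
--                     out.extend(lines[i+1:j])
--                     # closing
--                     out.append('"""' + ("\n" if not lines[j].endswith('\n') else "\n"))
--                     i = j + 1
--                     changed = True
--                     break
--                 j += 1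
--             else:
--                 # no closing found; keep the line as-is
--                 out.append(ln)
--                 i += 1
--         else:
--             out.append(ln)
--             i += 1
--     return ''.join(out), changed
-- ===== SOURCE B (Python) =====
-- from typing import Tuple
--
-- def fix_double_quote_docstring_pairs(text: str) -> Tuple[str, bool]:
--     """Single forward pass: buffer lines after an unmatched bare-'""' opener
--     and flush them as a triple-quoted block when the closing '""' arrives
--     within the 300-line window, instead of re-scanning ahead per opener."""
--     out = []
--     changed = False
--     opener = None   # the pending bare-quote line, or None
--     buf = []        # lines seen since the pending opener
--     for ln in text.splitlines(True):
--         if opener is None: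
--             if ln.strip() == '""':
--                 opener, buf = ln, []
--             else:
--                 out.append(ln)
--         elif ln.strip() == '""':
--             out.append('"""\n')
--             out.extend(buf)
--             out.append('"""\n')
--             changed = True
--             opener = None
--         else:
--             buf.append(ln)
--             if len(buf) == 300:
--                 # window exhausted: opener stays as-is; buffered lines hold no pair
--                 out.append(opener)
--                 out.extend(buf)
--                 opener = None
--     if opener is not None:
--         out.append(opener)
--         out.extend(buf)
--     return ''.join(out), changed
-- ===== Notes on version B (the rewrite author's own statement) =====
-- stated objective: alternative
-- what changed: Replaced A's per-opener forward rescan (an inner while-loop looking up to 300 lines ahead from every bare-"" line) by a single forward pass that buffers lines after a pending opener and flushes the buffer as a triple-quoted block when the closer arrives, or verbatim when the 300-line window is exhausted.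
import Mathlib
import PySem

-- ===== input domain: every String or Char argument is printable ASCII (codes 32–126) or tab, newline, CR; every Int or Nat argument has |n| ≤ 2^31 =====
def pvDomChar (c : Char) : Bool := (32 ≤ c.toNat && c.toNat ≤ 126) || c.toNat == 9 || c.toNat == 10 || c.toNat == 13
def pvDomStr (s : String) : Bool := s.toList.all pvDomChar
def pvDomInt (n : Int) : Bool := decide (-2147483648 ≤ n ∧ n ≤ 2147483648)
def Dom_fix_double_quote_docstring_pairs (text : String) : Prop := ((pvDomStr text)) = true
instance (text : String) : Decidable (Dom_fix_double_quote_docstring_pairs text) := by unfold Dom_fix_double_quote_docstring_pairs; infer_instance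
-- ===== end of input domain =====

-- B replaces A's per-opener 300-line lookahead rescan by one forward pass carrying a pending-opener buffer (objective: alternative).

-- ===== PORT A =====
-- str.splitlines(keepends=True), ported by hand (PySem.Chars.splitlines drops the ends):
-- exact on Dom, where the only line-break characters are '\n', '\r\n' and '\r'.
def pvSplitKeepGo : List Char → List Char → List (List Char)
  | acc, [] => if acc = [] then [] else [acc.reverse]
  | acc, '\r' :: '\n' :: rest => (acc.reverse ++ ['\r', '\n']) :: pvSplitKeepGo [] rest
  | acc, '\n' :: rest => (acc.reverse ++ ['\n']) :: pvSplitKeepGo [] rest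
  | acc, '\r' :: rest => (acc.reverse ++ ['\r']) :: pvSplitKeepGo [] rest
  | acc, c :: rest => pvSplitKeepGo (c :: acc) rest

def pvSplitlinesKeep (cs : List Char) : List (List Char) := pvSplitKeepGo [] cs

-- A's while-loop over the index i, as structural recursion on the suffix lines[i:];
-- the inner while-loop (j from i+1 while j ≤ i+300) is pvFindClose over the tail with fuel 300.
def pvFindClose : List (List Char) → Nat → Option Nat
  | _, 0 => none
  | [], _ + 1 => none
  | l :: rest, fuel + 1 =>
    if PySem.Chars.strip l = ['\"', '\"'] then some 0
    else (pvFindClose rest fuel).map (· + 1)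

def pvLoopA : List (List Char) → Bool → List (List Char) × Bool
  | [], changed => ([], changed)
  | ln :: tl, changed =>
    if PySem.Chars.strip ln = ['\"', '\"'] then
      match pvFindClose tl 300 with
      | some k =>
        let r := pvLoopA (tl.drop (k + 1)) true
        ((['\"', '\"', '\"'] ++ (if !(PySem.Chars.endswith ln ['\n']) then ['\n'] else ['\n'])) ::
          (tl.take k ++
            (['\"', '\"', '\"'] ++ (if !(PySem.Chars.endswith (tl.getD k []) ['\n']) then ['\n'] else ['\n'])) ::
            r.1), r.2)
      | none =>
        let r := pvLoopA tl changed
        (ln :: r.1, r.2)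
    else
      let r := pvLoopA tl changed
      (ln :: r.1, r.2)
termination_by ls _ => ls.length
decreasing_by all_goals (simp; try omega)

def fix_double_quote_docstring_pairs (text : String) : String × Bool :=
  let lines := pvSplitlinesKeep text.toList
  let r := pvLoopA lines false
  (String.ofList (PySem.Chars.join [] r.1), r.2)

-- ===== PORT B =====
-- one forward pass; the state is the pending opener line with the lines buffered since it
def pvLoopB : List (List Char) → Option (List Char × List (List Char)) → Bool → List (List Char) × Bool
  | [], none, changed => ([], changed)
  | [], some (op, buf), changed => (op :: buf, changed)
  | ln :: tl, none, changed =>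
    if PySem.Chars.strip ln = ['\"', '\"'] then pvLoopB tl (some (ln, [])) changed
    else
      let r := pvLoopB tl none changed
      (ln :: r.1, r.2)
  | ln :: tl, some (op, buf), changed =>
    if PySem.Chars.strip ln = ['\"', '\"'] then
      let r := pvLoopB tl none true
      (['\"', '\"', '\"', '\n'] :: (buf ++ ['\"', '\"', '\"', '\n'] :: r.1), r.2)
    else
      let buf' := buf ++ [ln]
      if buf'.length = 300 then
        let r := pvLoopB tl none changed
        (op :: (buf' ++ r.1), r.2)
      else pvLoopB tl (some (op, buf')) changed

def fix_double_quote_docstring_pairs_alt (text : String) : String × Bool :=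
  let r := pvLoopB (pvSplitlinesKeep text.toList) none false
  (String.ofList (PySem.Chars.join [] r.1), r.2)

-- ===== PRECONDITION & SPEC =====
def Spec_fix_double_quote_docstring_pairs (text : String) (out : String × Bool) : Prop := out = fix_double_quote_docstring_pairs_alt text
instance (text : String) (out : String × Bool) : Decidable (Spec_fix_double_quote_docstring_pairs text out) := by unfold Spec_fix_double_quote_docstring_pairs; infer_instance

-- ===== CLAIM (what is proved, stated in full; the proofs are below) =====
def Claim_equal_fix_double_quote_docstring_pairs : Prop := ∀ (text : String), Dom_fix_double_quote_docstring_pairs text → Spec_fix_double_quote_docstring_pairs text (fix_double_quote_docstring_pairs text)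

-- ===== LEMMAS AND PROOFS =====

-- a failed 300-line lookahead means the looked-at lines are not bare-quote lines
lemma pvFindClose_none {ls : List (List Char)} {fuel : Nat} (h : pvFindClose ls fuel = none) :
    ∀ l ∈ ls.take fuel, PySem.Chars.strip l ≠ ['\"', '\"'] := by
  induction ls generalizing fuel with
  | nil => simp
  | cons ln tl ih =>
    cases fuel with
    | zero => simp
    | succ f =>
      simp only [pvFindClose] at h
      split at h
      · exact absurd h (by simp)
      · intro l hl
        simp only [List.take_succ_cons, List.mem_cons] at hl
        rcases hl with rfl | hl
        · assumption
        · exact ih (by cases hfc : pvFindClose tl f <;> simp [hfc] at h ⊢) l hl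

-- A's loop passes a run of non-bare-quote lines straight through to the output
lemma pvLoopA_skip (m : Nat) (ls : List (List Char)) (ch : Bool)
    (h : ∀ l ∈ ls.take m, PySem.Chars.strip l ≠ ['\"', '\"']) :
    pvLoopA ls ch = (ls.take m ++ (pvLoopA (ls.drop m) ch).1, (pvLoopA (ls.drop m) ch).2) := by
  induction m generalizing ls with
  | zero => simp
  | succ m ih =>
    cases ls with
    | nil => simp
    | cons ln tl =>
      have hln : PySem.Chars.strip ln ≠ ['\"', '\"'] := h ln (by simp)
      simp only [pvLoopA, if_neg hln, List.take_succ_cons, List.drop_succ_cons, List.cons_append]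
      rw [ih tl (by intro l hl; exact h l (by simp [hl]))]

-- B's pending state, characterised by what the 300-line lookahead would have found
lemma pvLoopB_pend_some (tl : List (List Char)) (op : List Char) (buf : List (List Char))
    (ch : Bool) (k : Nat) (hb : buf.length < 300)
    (h : pvFindClose tl (300 - buf.length) = some k) :
    pvLoopB tl (some (op, buf)) ch =
      (['\"', '\"', '\"', '\n'] :: (buf ++ tl.take k ++ ['\"', '\"', '\"', '\n'] ::
        (pvLoopB (tl.drop (k + 1)) none true).1), (pvLoopB (tl.drop (k + 1)) none true).2) := by
  induction tl generalizing buf ch k with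
  | nil =>
    obtain ⟨m, hm⟩ : ∃ m, 300 - buf.length = m + 1 := ⟨299 - buf.length, by omega⟩
    rw [hm] at h; simp [pvFindClose] at h
  | cons ln tl ih =>
    obtain ⟨m, hm⟩ : ∃ m, 300 - buf.length = m + 1 := ⟨299 - buf.length, by omega⟩
    rw [hm] at h
    by_cases hq : PySem.Chars.strip ln = ['\"', '\"']
    · simp only [pvFindClose, if_pos hq, Option.some.injEq] at h
      subst h
      simp [pvLoopB, hq]
    · simp only [pvFindClose, if_neg hq] at h
      cases hfc : pvFindClose tl m with
      | none => simp [hfc] at h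
      | some k' =>
        rw [hfc] at h
        simp only [Option.map_some, Option.some.injEq] at h
        subst h
        have hm' : m = 300 - (buf ++ [ln]).length := by
          simp only [List.length_append, List.length_cons, List.length_nil]; omega
        by_cases h300 : (buf ++ [ln]).length = 300
        · exfalso
          have hm0 : m = 0 := by
            simp only [List.length_append, List.length_cons, List.length_nil] at h300; omega
          subst hm0
          simp [pvFindClose] at hfc
        · simp only [pvLoopB, if_neg hq, if_neg h300]
          rw [ih (buf ++ [ln]) ch k' (by simp only [List.length_append, List.length_cons, List.length_nil] at h300 ⊢; omega) (by rw [← hm']; exact hfc)]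
          simp

lemma pvLoopB_pend_none (tl : List (List Char)) (op : List Char) (buf : List (List Char))
    (ch : Bool) (hb : buf.length < 300)
    (h : pvFindClose tl (300 - buf.length) = none) :
    pvLoopB tl (some (op, buf)) ch =
      (op :: (buf ++ tl.take (300 - buf.length) ++
        (pvLoopB (tl.drop (300 - buf.length)) none ch).1),
       (pvLoopB (tl.drop (300 - buf.length)) none ch).2) := by
  induction tl generalizing buf ch with
  | nil => simp [pvLoopB]
  | cons ln tl ih =>
    obtain ⟨m, hm⟩ : ∃ m, 300 - buf.length = m + 1 := ⟨299 - buf.length, by omega⟩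
    rw [hm] at h ⊢
    by_cases hq : PySem.Chars.strip ln = ['\"', '\"']
    · simp [pvFindClose, hq] at h
    · simp only [pvFindClose, if_neg hq] at h
      have hfc : pvFindClose tl m = none := by
        cases hfc : pvFindClose tl m <;> simp [hfc] at h ⊢
      have hm' : m = 300 - (buf ++ [ln]).length := by
        simp only [List.length_append, List.length_cons, List.length_nil]; omega
      by_cases h300 : (buf ++ [ln]).length = 300
      · have hm0 : m = 0 := by
          simp only [List.length_append, List.length_cons, List.length_nil] at h300; omega
        subst hm0
        simp [pvLoopB, hq, h300]
      · simp only [pvLoopB, if_neg hq, if_neg h300]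
        rw [ih (buf ++ [ln]) ch (by simp only [List.length_append, List.length_cons, List.length_nil] at h300 ⊢; omega) (by rw [← hm']; exact hfc)]
        rw [← hm'] at *
        simp [List.take_succ_cons, List.drop_succ_cons]

-- the two loops agree
lemma pvLoopA_eq_pvLoopB : ∀ (n : Nat) (ls : List (List Char)), ls.length ≤ n →
    ∀ ch, pvLoopA ls ch = pvLoopB ls none ch := by
  intro n
  induction n with
  | zero =>
    intro ls hl ch
    have h0 : ls = [] := List.length_eq_zero_iff.mp (Nat.le_zero.mp hl)
    subst h0
    simp [pvLoopA, pvLoopB]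
  | succ n ih =>
    intro ls hl ch
    cases ls with
    | nil => simp [pvLoopA, pvLoopB]
    | cons ln tl =>
      simp only [List.length_cons] at hl
      by_cases hq : PySem.Chars.strip ln = ['\"', '\"']
      · rw [show pvLoopB (ln :: tl) none ch = pvLoopB tl (some (ln, [])) ch by
          simp [pvLoopB, hq]]
        cases hfc : pvFindClose tl 300 with
        | some k =>
          rw [pvLoopB_pend_some tl ln [] ch k (by simp) (by simpa using hfc)]
          simp only [pvLoopA, if_pos hq, hfc]
          rw [← ih (tl.drop (k + 1)) (by simp; omega) true]
          simp
        | none =>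
          rw [pvLoopB_pend_none tl ln [] ch (by simp) (by simpa using hfc)]
          simp only [pvLoopA, if_pos hq, hfc]
          rw [pvLoopA_skip 300 tl ch (pvFindClose_none hfc)]
          rw [ih (tl.drop 300) (by simp; omega) ch]
          simp
      · simp only [pvLoopA, pvLoopB, if_neg hq]
        rw [ih tl (by omega) ch]

-- ===== VERDICT (by name: the statement is the Claim_ definition above) =====
theorem fix_double_quote_docstring_pairs_spec : Claim_equal_fix_double_quote_docstring_pairs := by
  intro text _
  unfold Spec_fix_double_quote_docstring_pairs
  show (String.ofList (PySem.Chars.join [] (pvLoopA (pvSplitlinesKeep text.toList) false).1),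
      (pvLoopA (pvSplitlinesKeep text.toList) false).2) =
    (String.ofList (PySem.Chars.join [] (pvLoopB (pvSplitlinesKeep text.toList) none false).1),
      (pvLoopB (pvSplitlinesKeep text.toList) none false).2)
  rw [pvLoopA_eq_pvLoopB (pvSplitlinesKeep text.toList).length _ le_rfl false]
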